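-- pv_equiv track=rewrite | github.com/jason-j-wang/leetcode-solutions | solutions/3748.py | countStableSubarrays
-- ===== SOURCE A (Python) =====
-- from typing import List
--
-- def countStableSubarrays(nums: List[int], queries: List[List[int]]) -> List[int]:
--     prev = -1
--
--     n = len(nums)
--     total = 0
--     left = 0
--     prefix = [0 for _ in range(n)]
--     num_invs = [0 for _ in range(n)]
--     next_inv = [-1 for _ in range(n)]
--     prev_inv = [-1 for _ in range(n)]
--
--     #simultaneously calc prefix and previous inversion for each index
--     pi = -1
--     for i, num in enumerate(nums):
--         #inversion
--         if num < prev: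
--             num_invs[i] += 1
--             length = i - left
--             total += length * (length + 1) // 2
--             for j in range(left, i):
--                 prefix[j] = total
--             left = i
--
--         if i > 0:
--             num_invs[i] += num_invs[i-1]
--         prev = num
--
--         if num_invs[i] != num_invs[i-1]:
--             pi = i - 1
--         prev_inv[i] = pi
--
--     length = n - left
--     total += length * (length + 1) // 2
--     for j in range(left, n):
--         prefix[j] = total
--
--     # next inversion for each index
--     next = -1
--     for i in range(n - 2, -1, -1):
--         if num_invs[i] != num_invs[i+1]:
--             next = i + 1
--         next_inv[i] = next
--
--     ans = [0 for _ in range(len(queries))]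
--
--     for i, (l, r) in enumerate(queries):
--         if num_invs[l] == num_invs[r]:
--             length = r - l + 1
--             ans[i] = length * (length + 1) // 2
--         else:
--             left_next = next_inv[l]
--             right_prev = prev_inv[r]
--             base = max(0, prefix[right_prev] - prefix[l])
--
--             left_length = left_next - l
--             base += left_length * (left_length + 1) // 2
--
--             right_prev = prev_inv[r]
--             right_length = r - right_prev
--             base += right_length * (right_length + 1) // 2
--             ans[i] = base
--
--     return ans
-- ===== SOURCE B (Python) =====
-- from typing import List
--
-- def countStableSubarrays(nums: List[int], queries: List[List[int]]) -> List[int]: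
--     n = len(nums)
--     # start[y] = first index of the maximal non-decreasing run containing y
--     start = [0] * n
--     for i in range(1, n):
--         start[i] = i if nums[i] < nums[i - 1] else start[i - 1]
--     # a stable subarray ending at y inside [l, r] starts anywhere in [max(l, start[y]), y]
--     return [sum(y - max(l, start[y]) + 1 for y in range(l, r + 1)) for l, r in queries]
-- ===== Notes on version B (the rewrite author's own statement) =====
-- stated objective: simpler
-- what changed: B replaces A's four precomputed tables (prefix sums of run triangles, inversion counts, next/previous inversion indices) by a single run-start array and answers each query by directly summing, over each end position y in [l,r], the count y - max(l, start[y]) + 1 of stable subarrays ending at y.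
-- outside the precondition, e.g. on countStableSubarrays([3, 1, 2], [[2, 0]]): A returns [4], B returns [0]; on countStableSubarrays([3, 1], [[-1, 1]]): A returns [6], B returns [1]
import Mathlib
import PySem

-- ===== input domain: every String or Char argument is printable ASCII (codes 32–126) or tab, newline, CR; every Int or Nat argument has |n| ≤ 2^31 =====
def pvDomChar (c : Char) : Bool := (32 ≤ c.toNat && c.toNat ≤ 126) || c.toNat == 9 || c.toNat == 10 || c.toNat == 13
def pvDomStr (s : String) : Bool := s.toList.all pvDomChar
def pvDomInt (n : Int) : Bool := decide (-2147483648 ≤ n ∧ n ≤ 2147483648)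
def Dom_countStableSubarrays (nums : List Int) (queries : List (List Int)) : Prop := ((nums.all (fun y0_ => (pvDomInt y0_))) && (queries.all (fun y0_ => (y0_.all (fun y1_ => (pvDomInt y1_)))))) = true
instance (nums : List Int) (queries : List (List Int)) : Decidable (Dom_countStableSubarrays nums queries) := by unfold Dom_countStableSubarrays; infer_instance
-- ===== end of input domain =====

-- B replaces A's four tables (prefix, num_invs, next_inv, prev_inv) by one run-start array and a
-- direct per-query sum; objective: simpler (B is not faster — it rescans each query range).

-- ===== PORT A =====
-- loop state of A's first pass: prev, total, left, prefix, num_invs, prev_inv, pi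
structure pvStA where
  prev : Int
  total : Int
  left : Int
  pre : List Int
  numInvs : List Int
  prevInv : List Int
  pi : Int
deriving Repr, DecidableEq

-- one iteration of A's first loop (i = enumerate index, num = nums[i]);
-- pyGetD/pySetD indices are in range under Pre_ (Python's negative index -1 at i=0 included)
def pvStepA (s : pvStA) (i : Int) (num : Int) : pvStA :=
  let s1 : pvStA :=
    if num < s.prev then
      let numInvs := PySem.List.pySetD s.numInvs i (PySem.List.pyGetD s.numInvs i 0 + 1)
      let length := i - s.left
      let total := s.total + PySem.Int.floordiv (length * (length + 1)) 2
      let pre := (PySem.List.pyRange s.left i 1).foldl (fun p j => PySem.List.pySetD p j total) s.pre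
      { s with numInvs := numInvs, total := total, pre := pre, left := i }
    else s
  let numInvs :=
    if i > 0 then
      PySem.List.pySetD s1.numInvs i
        (PySem.List.pyGetD s1.numInvs i 0 + PySem.List.pyGetD s1.numInvs (i - 1) 0)
    else s1.numInvs
  let pi :=
    if PySem.List.pyGetD numInvs i 0 ≠ PySem.List.pyGetD numInvs (i - 1) 0 then i - 1 else s1.pi
  { prev := num, total := s1.total, left := s1.left, pre := s1.pre,
    numInvs := numInvs, prevInv := PySem.List.pySetD s1.prevInv i pi, pi := pi }

def countStableSubarrays (nums : List Int) (queries : List (List Int)) : List Int :=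
  let n : Int := PySem.List.len nums
  let s0 : pvStA :=
    { prev := -1, total := 0, left := 0,
      pre := (PySem.List.pyRange 0 n 1).map (fun _ => 0),
      numInvs := (PySem.List.pyRange 0 n 1).map (fun _ => 0),
      prevInv := (PySem.List.pyRange 0 n 1).map (fun _ => (-1 : Int)), pi := -1 }
  let s := (PySem.List.enumerate nums 0).foldl (fun s p => pvStepA s p.1 p.2) s0
  let length := n - s.left
  let total := s.total + PySem.Int.floordiv (length * (length + 1)) 2
  let pre := (PySem.List.pyRange s.left n 1).foldl (fun p j => PySem.List.pySetD p j total) s.pre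
  -- next inversion for each index (reverse loop, state = (next, next_inv))
  let nextInv :=
    ((PySem.List.pyRange (n - 2) (-1) (-1)).foldl
      (fun (st : Int × List Int) i =>
        let nx := if PySem.List.pyGetD s.numInvs i 0 ≠ PySem.List.pyGetD s.numInvs (i + 1) 0
                  then i + 1 else st.1
        (nx, PySem.List.pySetD st.2 i nx))
      (-1, (PySem.List.pyRange 0 n 1).map (fun _ => (-1 : Int)))).2
  -- query loop; the tuple unpack 'l, r = query' is exact for the length-2 queries Pre_ admits
  (PySem.List.enumerate queries 0).foldl
    (fun ans p =>
      let l := PySem.List.pyGetD p.2 0 0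
      let r := PySem.List.pyGetD p.2 1 0
      let v :=
        if PySem.List.pyGetD s.numInvs l 0 = PySem.List.pyGetD s.numInvs r 0 then
          let length := r - l + 1
          PySem.Int.floordiv (length * (length + 1)) 2
        else
          let leftNext := PySem.List.pyGetD nextInv l 0
          let rightPrev := PySem.List.pyGetD s.prevInv r 0
          let base := max 0 (PySem.List.pyGetD pre rightPrev 0 - PySem.List.pyGetD pre l 0)
          let leftLength := leftNext - l
          let base := base + PySem.Int.floordiv (leftLength * (leftLength + 1)) 2
          let rightLength := r - rightPrev
          base + PySem.Int.floordiv (rightLength * (rightLength + 1)) 2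
      PySem.List.pySetD ans p.1 v)
    ((PySem.List.pyRange 0 (PySem.List.len queries) 1).map (fun _ => 0))

-- ===== PORT B =====
def countStableSubarrays_alt (nums : List Int) (queries : List (List Int)) : List Int :=
  let n : Int := PySem.List.len nums
  let start :=
    (PySem.List.pyRange 1 n 1).foldl
      (fun st i =>
        PySem.List.pySetD st i
          (if PySem.List.pyGetD nums i 0 < PySem.List.pyGetD nums (i - 1) 0 then i
           else PySem.List.pyGetD st (i - 1) 0))
      (PySem.List.pyRepeat [0] n)
  -- the 'for l, r in queries' unpack is exact for the length-2 queries Pre_ admits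
  queries.map (fun q =>
    let l := PySem.List.pyGetD q 0 0
    let r := PySem.List.pyGetD q 1 0
    (PySem.List.pyRange l (r + 1) 1).foldl
      (fun acc y => acc + (y - max l (PySem.List.pyGetD start y 0) + 1)) 0)

-- ===== PRECONDITION & SPEC =====
-- Pre_ restricts to the task's natural domain: every query is a pair [l, r] of in-range indices
-- with 0 ≤ l ≤ r < len(nums).  A raises (ValueError/IndexError) on non-pairs and on r ≥ n or
-- l,r < -n; on reversed (l > r) or negative in-range queries A's value comes from negative-index
-- wraparound and negative 'lengths', outside the problem's stated domain.
def Pre_countStableSubarrays (nums : List Int) (queries : List (List Int)) : Prop :=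
  ∀ q ∈ queries, q.length = 2 ∧ 0 ≤ q.getD 0 0 ∧ q.getD 0 0 ≤ q.getD 1 0 ∧
    q.getD 1 0 < (nums.length : Int)
instance (nums : List Int) (queries : List (List Int)) :
    Decidable (Pre_countStableSubarrays nums queries) := by
  unfold Pre_countStableSubarrays; infer_instance

def pvWitness_countStableSubarrays : List Int × List (List Int) :=
  ([2, 1, 3], [[0, 2], [1, 1], [0, 0]])

def Spec_countStableSubarrays (nums : List Int) (queries : List (List Int)) (out : List Int) : Prop :=
  out = countStableSubarrays_alt nums queries
instance (nums : List Int) (queries : List (List Int)) (out : List Int) :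
    Decidable (Spec_countStableSubarrays nums queries out) := by
  unfold Spec_countStableSubarrays; infer_instance

-- ===== CLAIM (what is proved, stated in full; the proofs are below) =====
def Claim_equal_countStableSubarrays : Prop :=
  ∀ (nums : List Int) (queries : List (List Int)), Dom_countStableSubarrays nums queries →
    Pre_countStableSubarrays nums queries →
    Spec_countStableSubarrays nums queries (countStableSubarrays nums queries)

-- ===== LEMMAS AND PROOFS =====

-- ---- mathematical model shared by both proofs ----

-- inversion at j (j ≥ 1, nums[j] < nums[j-1])
def pvInv (nums : List Int) (j : Nat) : Bool :=
  decide (0 < j) && decide (j < nums.length) && decide (nums.getD j 0 < nums.getD (j - 1) 0)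

-- start of the maximal non-decreasing run containing y
def pvStart (nums : List Int) : Nat → Nat
  | 0 => 0
  | j + 1 => if pvInv nums (j + 1) then j + 1 else pvStart nums j

def pvTerm (nums : List Int) (y : Nat) : Int := (y : Int) - pvStart nums y + 1

def pvC (nums : List Int) (m : Nat) : Int := ((List.range m).map (pvTerm nums)).sum

def pvCnt (nums : List Int) (i : Nat) : Nat := (List.range (i + 1)).countP (pvInv nums)

-- A's phantom initial inversion (nums[0] < prev = -1)
def pvPhantom (nums : List Int) : Bool :=
  decide (0 < nums.length) && decide (nums.getD 0 0 < -1)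

def pvCntA (nums : List Int) (i : Nat) : Int :=
  (if pvPhantom nums then 1 else 0) + pvCnt nums i

-- first j ≥ m with pvInv
def pvFIF (nums : List Int) (m : Nat) : Option Nat :=
  if _h : m < nums.length then (if pvInv nums m then some m else pvFIF nums (m + 1)) else none
termination_by nums.length - m

def pvNext (nums : List Int) (i : Nat) : Int :=
  match pvFIF nums (i + 1) with | some j => j | none => -1
def pvNextN (nums : List Int) (i : Nat) : Nat :=
  match pvFIF nums (i + 1) with | some j => j | none => nums.length

-- last j ≤ i with pvInv
def pvLIU (nums : List Int) : Nat → Option Nat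
  | 0 => none
  | i + 1 => if pvInv nums (i + 1) then some (i + 1) else pvLIU nums i
def pvPrev (nums : List Int) (i : Nat) : Int :=
  match pvLIU nums i with | some j => (j : Int) - 1 | none => -1

def pvTri (m : Nat) : Int := ((List.range m).map (fun (d : Nat) => (d : Int) + 1)).sum

-- current run start after processing i elements
def pvSN (nums : List Int) (i : Nat) : Nat := match i with | 0 => 0 | k + 1 => pvStart nums k

-- per-query answer both programs compute
def pvAns (nums : List Int) (l r : Nat) : Int :=
  ((List.range' l (r + 1 - l)).map
    (fun (y : Nat) => (y : Int) - max (l : Int) ((pvStart nums y : Nat) : Int) + 1)).sum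

-- invariant of A's first loop after processing i elements
def pvInvar (nums : List Int) (i : Nat) (s : pvStA) : Prop :=
  s.prev = (match i with | 0 => -1 | k + 1 => nums.getD k 0) ∧
  s.left = (pvSN nums i : Int) ∧
  s.total = pvC nums (pvSN nums i) ∧
  s.numInvs = (List.range nums.length).map (fun j => if j < i then pvCntA nums j else 0) ∧
  s.pre = (List.range nums.length).map
    (fun j => if j < pvSN nums i then pvC nums (pvNextN nums j) else 0) ∧
  s.pi = (match i with | 0 => -1 | k + 1 => pvPrev nums k) ∧
  s.prevInv = (List.range nums.length).map (fun j => if j < i then pvPrev nums j else -1)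

-- ---- generic list lemmas ----

lemma pvRangeNat (a b : Nat) :
    PySem.List.pyRange a b 1 = (List.range' a (b - a)).map (fun (j : Nat) => (j : Int)) := by
  have hR : (List.range' a (b - a)).map (fun (j : Nat) => (j : Int))
      = (List.range (b - a)).map (fun (k : Nat) => (a : Int) + 1 * (k : Int)) := by
    rw [List.range'_eq_map_range]
    simp only [List.map_map]
    apply List.map_congr_left
    intro k _
    simp only [Function.comp_apply]
    push_cast
    ring
  rw [hR]
  simp only [PySem.List.pyRange]
  norm_num
  rcases Nat.lt_or_ge a b with h | h
  · simp [h]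
  · have hz : b - a = 0 := by omega
    simp [Nat.not_lt.mpr h, hz]

lemma pvGetMap (n : Nat) (F : Nat → Int) (i : Int) (d : Int) (h0 : 0 ≤ i) (h1 : i < (n : Int)) :
    PySem.List.pyGetD ((List.range n).map F) i d = F i.toNat := by
  have hlen : ((List.range n).map F).length = n := by simp
  rw [PySem.List.pyGetD_eq_getElem _ d h0 (by rw [hlen]; exact_mod_cast h1)]
  have hi : i.toNat < n := by omega
  simp [hi]

lemma pvGetMapLast (n : Nat) (F : Nat → Int) (d : Int) (h : 0 < n) :
    PySem.List.pyGetD ((List.range n).map F) (-1) d = F (n - 1) := by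
  have hne : (List.range n).map F ≠ [] := by
    simp only [ne_eq, List.map_eq_nil_iff, List.range_eq_nil]
    omega
  rw [PySem.List.pyGetD_neg_one _ d hne, List.getLast_eq_getElem]
  have h1 : n - 1 < n := by omega
  simp [h1]

lemma pvSetMap (n : Nat) (F : Nat → Int) (i : Nat) (v : Int) (h : i < n) :
    ((List.range n).map F).set i v = (List.range n).map (fun j => if j = i then v else F j) := by
  apply List.ext_getElem
  · simp
  · intro k h1 h2
    have hk : k < n := by simpa using h2
    simp [List.getElem_set, hk]
    by_cases hik : i = k
    · simp [hik]
    · rw [if_neg hik, if_neg (fun hh => hik hh.symm)]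

lemma pvGetMapN (n : Nat) (F : Nat → Int) (k : Nat) (d : Int) (h : k < n) :
    PySem.List.pyGetD ((List.range n).map F) (k : Int) d = F k := by
  rw [pvGetMap n F k d (by omega) (by exact_mod_cast h), Int.toNat_natCast]

lemma pvSetMapN (n : Nat) (F : Nat → Int) (k : Nat) (v : Int) (h : k < n) :
    PySem.List.pySetD ((List.range n).map F) (k : Int) v
      = (List.range n).map (fun j => if j = k then v else F j) := by
  rw [PySem.List.pySetD_natCast, pvSetMap n F k v h]

lemma pvFill (n : Nat) (F : Nat → Int) (a b : Nat) (hb : b ≤ n) (v : Int) :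
    (PySem.List.pyRange (a : Int) (b : Int) 1).foldl
      (fun p j => PySem.List.pySetD p j v) ((List.range n).map F)
    = (List.range n).map (fun j => if a ≤ j ∧ j < b then v else F j) := by
  rcases (by omega : b ≤ a ∨ a < b) with hab | hab
  · have hz : b - a = 0 := by omega
    rw [pvRangeNat, hz]
    simp only [List.range'_zero, List.map_nil, List.foldl_nil]
    apply List.map_congr_left
    intro j _
    rw [if_neg (by omega)]
  · rw [pvRangeNat]
    have h : a + (b - a) ≤ n := by omega
    have hgen : ∀ (m a : Nat) (F : Nat → Int), a + m ≤ n →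
        ((List.range' a m).map (fun (j : Nat) => (j : Int))).foldl
          (fun p j => PySem.List.pySetD p j v) ((List.range n).map F)
        = (List.range n).map (fun j => if a ≤ j ∧ j < a + m then v else F j) := by
      intro m
      induction m with
      | zero =>
        intro a F _
        simp only [List.range'_zero, List.map_nil, List.foldl_nil]
        apply List.map_congr_left
        intro j _
        rw [if_neg (by omega)]
      | succ m ih =>
        intro a F hm
        rw [show List.range' a (m + 1) = a :: List.range' (a + 1) m from rfl]
        simp only [List.map_cons, List.foldl_cons]
        rw [PySem.List.pySetD_natCast, pvSetMap n F a v (by omega)]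
        rw [ih (a + 1) _ (by omega)]
        apply List.map_congr_left
        intro j _
        by_cases h1 : a + 1 ≤ j ∧ j < a + 1 + m
        · rw [if_pos h1, if_pos (by omega)]
        · rw [if_neg h1]
          by_cases h2 : j = a
          · rw [if_pos h2, if_pos (by omega)]
          · rw [if_neg h2, if_neg (by omega)]
    have := hgen (b - a) a F h
    rw [show a + (b - a) = b from by omega] at this
    exact this

lemma pvEnumSet (F : List Int → Int) :
    ∀ (qs : List (List Int)) (acc : List Int) (k : Nat), acc.length = k + qs.length →
    (PySem.List.enumerate qs (k : Int)).foldl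
        (fun ans p => PySem.List.pySetD ans p.1 (F p.2)) acc
      = acc.take k ++ qs.map F := by
  intro qs
  induction qs with
  | nil =>
    intro acc k hl
    simp only [PySem.List.enumerate_nil, List.foldl_nil, List.map_nil, List.append_nil]
    simp only [List.length_nil] at hl
    rw [show k = acc.length from by omega, List.take_length]
  | cons q qs ih =>
    intro acc k hl
    rw [PySem.List.enumerate_cons, List.foldl_cons]
    have hk : k < acc.length := by simp at hl; omega
    rw [PySem.List.pySetD_natCast]
    rw [show (k : Int) + 1 = ((k + 1 : Nat) : Int) from by push_cast; ring]
    rw [ih (acc.set k (F q)) (k + 1) (by simp at hl ⊢; omega)]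
    have htk : (acc.set k (F q)).take (k+1) = acc.take k ++ [F q] := by
      rw [List.set_eq_take_append_cons_drop, if_pos hk, List.take_append]
      simp [List.take_take, List.length_take, Nat.le_of_lt hk]
    rw [htk]
    simp

-- ---- facts about the model ----

lemma pvStart_le (nums : List Int) (y : Nat) : pvStart nums y ≤ y := by
  induction y with
  | zero => simp [pvStart]
  | succ k ih =>
    rw [pvStart]
    split_ifs
    · exact le_refl _
    · omega

lemma pvStart_noInv (nums : List Int) (y k : Nat) (h1 : pvStart nums y < k) (h2 : k ≤ y) :
    pvInv nums k = false := by
  induction y with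
  | zero => simp [pvStart] at h1; omega
  | succ m ih =>
    rw [pvStart] at h1
    by_cases hin : pvInv nums (m + 1)
    · rw [if_pos hin] at h1; omega
    · rw [if_neg hin] at h1
      rcases (by omega : k = m + 1 ∨ k ≤ m) with hk | hk
      · subst hk; exact Bool.eq_false_iff.mpr hin
      · exact ih h1 hk

lemma pvStart_inv_le (nums : List Int) (y j : Nat) (hj : pvInv nums j = true) (h : j ≤ y) :
    j ≤ pvStart nums y := by
  have hj0 : 0 < j := by
    by_contra hc
    have : j = 0 := by omega
    subst this
    simp [pvInv] at hj
  induction y with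
  | zero => omega
  | succ m ih =>
    rw [pvStart]
    split_ifs with hin
    · omega
    · rcases (by omega : j = m + 1 ∨ j ≤ m) with hk | hk
      · subst hk; rw [hj] at hin; simp at hin
      · exact ih hk

lemma pvStart_self (nums : List Int) (p : Nat) (h : pvInv nums p = true) : pvStart nums p = p := by
  cases p with
  | zero => simp [pvInv] at h
  | succ k => rw [pvStart, if_pos h]

lemma pvStart_idem (nums : List Int) (y : Nat) : pvStart nums (pvStart nums y) = pvStart nums y := by
  induction y with
  | zero => simp [pvStart]
  | succ k ih =>
    rw [pvStart]
    split_ifs with hin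
    · exact pvStart_self nums (k + 1) hin
    · exact ih

lemma pvStart_const (nums : List Int) (s y : Nat) (hs : s ≤ y)
    (h : ∀ k, s < k → k ≤ y → pvInv nums k = false) : pvStart nums y = pvStart nums s := by
  induction y with
  | zero => rw [show s = 0 from by omega]
  | succ m ih =>
    rcases (by omega : s = m + 1 ∨ s ≤ m) with hs' | hs'
    · rw [hs']
    · rw [pvStart, if_neg (by rw [h (m + 1) (by omega) (le_refl _)]; simp)]
      exact ih hs' (fun k h1 h2 => h k h1 (by omega))

lemma pvFIF_spec (nums : List Int) (m j : Nat) (h : pvFIF nums m = some j) :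
    m ≤ j ∧ j < nums.length ∧ pvInv nums j = true ∧
      ∀ k, m ≤ k → k < j → pvInv nums k = false := by
  induction hfu : nums.length - m generalizing m with
  | zero =>
    rw [pvFIF, dif_neg (by omega)] at h
    exact absurd h (by simp)
  | succ t ih =>
    rw [pvFIF, dif_pos (by omega)] at h
    by_cases hin : pvInv nums m
    · rw [if_pos hin] at h
      obtain rfl : m = j := by simpa using h
      exact ⟨le_refl _, by omega, hin, fun k h1 h2 => by omega⟩
    · rw [if_neg hin] at h
      obtain ⟨h1, h2, h3, h4⟩ := ih (m + 1) h (by omega)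
      refine ⟨by omega, h2, h3, fun k hk1 hk2 => ?_⟩
      rcases (by omega : k = m ∨ m + 1 ≤ k) with hk | hk
      · subst hk; exact Bool.eq_false_iff.mpr hin
      · exact h4 k hk hk2

lemma pvFIF_none (nums : List Int) (m : Nat) (h : pvFIF nums m = none) :
    ∀ k, m ≤ k → pvInv nums k = false := by
  intro k hk
  induction hfu : nums.length - m generalizing m with
  | zero =>
    by_cases hkn : k < nums.length
    · omega
    · simp only [pvInv]
      simp [hkn]
  | succ t ih =>
    rw [pvFIF] at h
    by_cases hm : m < nums.length
    · rw [dif_pos hm] at h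
      by_cases hin : pvInv nums m
      · rw [if_pos hin] at h; exact absurd h (by simp)
      · rw [if_neg hin] at h
        rcases (by omega : k = m ∨ m + 1 ≤ k) with hk' | hk'
        · subst hk'; exact Bool.eq_false_iff.mpr hin
        · exact ih (m + 1) h hk' (by omega)
    · by_cases hkn : k < nums.length
      · omega
      · simp only [pvInv]
        simp [hkn]

lemma pvFIF_intro (nums : List Int) (m j : Nat) (hm : m ≤ j) (hj : pvInv nums j = true)
    (h : ∀ k, m ≤ k → k < j → pvInv nums k = false) : pvFIF nums m = some j := by
  have hjn : j < nums.length := by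
    by_contra hc
    simp only [pvInv] at hj
    simp [hc] at hj
  induction hfu : nums.length - m generalizing m with
  | zero => omega
  | succ t ih =>
    rw [pvFIF, dif_pos (by omega)]
    rcases (by omega : m = j ∨ m < j) with hm | hm
    · subst hm; rw [if_pos hj]
    · rw [if_neg (by rw [h m (le_refl _) hm]; simp)]
      exact ih (m + 1) (by omega) (fun k h1 h2 => h k (by omega) h2) (by omega)

lemma pvFIF_none_intro (nums : List Int) (m : Nat)
    (h : ∀ k, m ≤ k → pvInv nums k = false) : pvFIF nums m = none := by
  induction hfu : nums.length - m generalizing m with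
  | zero => rw [pvFIF, dif_neg (by omega)]
  | succ t ih =>
    rw [pvFIF, dif_pos (by omega), if_neg (by rw [h m (le_refl _)]; simp)]
    exact ih (m + 1) (fun k hk => h k (by omega)) (by omega)

lemma pvLIU_spec (nums : List Int) (i j : Nat) (h : pvLIU nums i = some j) :
    j ≤ i ∧ pvInv nums j = true ∧ ∀ k, j < k → k ≤ i → pvInv nums k = false := by
  induction i with
  | zero => simp [pvLIU] at h
  | succ m ih =>
    rw [pvLIU] at h
    by_cases hin : pvInv nums (m + 1)
    · rw [if_pos hin] at h
      obtain rfl : m + 1 = j := by simpa using h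
      exact ⟨le_refl _, hin, fun k h1 h2 => by omega⟩
    · rw [if_neg hin] at h
      obtain ⟨h1, h2, h3⟩ := ih h
      refine ⟨by omega, h2, fun k hk1 hk2 => ?_⟩
      rcases (by omega : k = m + 1 ∨ k ≤ m) with hk | hk
      · subst hk; exact Bool.eq_false_iff.mpr hin
      · exact h3 k hk1 hk

lemma pvLIU_none (nums : List Int) (i : Nat) (h : pvLIU nums i = none) :
    ∀ k, k ≤ i → pvInv nums k = false := by
  induction i with
  | zero =>
    intro k hk
    rw [show k = 0 from by omega]
    simp [pvInv]
  | succ m ih =>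
    rw [pvLIU] at h
    by_cases hin : pvInv nums (m + 1)
    · rw [if_pos hin] at h; exact absurd h (by simp)
    · rw [if_neg hin] at h
      intro k hk
      rcases (by omega : k = m + 1 ∨ k ≤ m) with hk' | hk'
      · subst hk'; exact Bool.eq_false_iff.mpr hin
      · exact ih h k hk'

lemma pvCnt_succ (nums : List Int) (i : Nat) :
    pvCnt nums (i + 1) = pvCnt nums i + (if pvInv nums (i + 1) then 1 else 0) := by
  simp only [pvCnt, List.range_succ, List.countP_append, List.countP_cons, List.countP_nil]
  split_ifs with h <;> simp [h]

lemma pvCntA_eq_iff (nums : List Int) (l r : Nat) (h : l ≤ r) :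
    (pvCntA nums l = pvCntA nums r ↔ ∀ k, l < k → k ≤ r → pvInv nums k = false) := by
  have hmain : ∀ m, (pvCnt nums l = pvCnt nums (l + m) ↔
      ∀ k, l < k → k ≤ l + m → pvInv nums k = false) := by
    intro m
    induction m with
    | zero => constructor
              · intro _ k h1 h2; omega
              · intro _; rfl
    | succ t ih =>
      rw [show l + (t + 1) = (l + t) + 1 from by omega, pvCnt_succ]
      constructor
      · intro he k h1 h2
        have hle : pvCnt nums l ≤ pvCnt nums (l + t) := by
          clear he ih h1 h2
          induction t with
          | zero => exact le_refl _
          | succ u ihu => rw [show l + (u + 1) = (l + u) + 1 from by omega, pvCnt_succ]; omega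
        have hin0 : (if pvInv nums (l + t + 1) then 1 else 0) = 0 := by omega
        have hin : pvInv nums (l + t + 1) = false := by
          by_contra hc
          simp [Bool.not_eq_false] at hc
          rw [if_pos hc] at hin0; omega
        rcases (by omega : k = l + t + 1 ∨ k ≤ l + t) with hk | hk
        · subst hk; exact hin
        · exact (ih.mp (by omega)) k h1 hk
      · intro hall
        rw [if_neg (by rw [hall (l + t + 1) (by omega) (by omega)]; simp)]
        rw [← ih.mpr (fun k h1 h2 => hall k h1 (by omega))]
        omega
  have := hmain (r - l)
  rw [show l + (r - l) = r from by omega] at this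
  simp only [pvCntA]
  constructor
  · intro he; exact this.mp (by omega)
  · intro hall; have := this.mpr hall; omega

lemma pvC_succ (nums : List Int) (m : Nat) : pvC nums (m + 1) = pvC nums m + pvTerm nums m := by
  simp [pvC, List.range_succ]

lemma pvC_split (nums : List Int) (f p : Nat) (h : f ≤ p) :
    pvC nums p = pvC nums f + ((List.range' f (p - f)).map (pvTerm nums)).sum := by
  have hgen : ∀ m, pvC nums (f + m) = pvC nums f + ((List.range' f m).map (pvTerm nums)).sum := by
    intro m
    induction m with
    | zero => simp
    | succ t ih =>
      have hr : List.range' f (t + 1) = List.range' f t ++ [f + t] := by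
        have := List.range'_append (s := f) (m := t) (n := 1) (step := 1)
        simp only [Nat.mul_one, one_mul, List.range'_one] at this
        rw [← this]
      rw [show f + (t + 1) = (f + t) + 1 from by omega, pvC_succ, ih, hr]
      simp [add_assoc]
  have := hgen (p - f)
  rw [show f + (p - f) = p from by omega] at this
  exact this

lemma pvC_mono (nums : List Int) (f p : Nat) (h : f ≤ p) : pvC nums f ≤ pvC nums p := by
  rw [pvC_split nums f p h]
  have : 0 ≤ ((List.range' f (p - f)).map (pvTerm nums)).sum := by
    apply List.sum_nonneg
    intro x hx
    simp only [List.mem_map] at hx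
    obtain ⟨y, _, rfl⟩ := hx
    have := pvStart_le nums y
    simp only [pvTerm]
    omega
  omega

lemma pvTri_floordiv (m : Nat) :
    pvTri m = PySem.Int.floordiv ((m : Int) * ((m : Int) + 1)) 2 := by
  have hc : (m : Int) * ((m : Int) + 1) = ((m * (m + 1) : Nat) : Int) := by push_cast; ring
  rw [hc, show (2 : Int) = ((2 : Nat) : Int) from rfl, PySem.Int.floordiv_natCast]
  clear hc
  induction m with
  | zero => simp [pvTri]
  | succ t ih =>
    have hnat : (t + 1) * (t + 1 + 1) / 2 = t * (t + 1) / 2 + (t + 1) := by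
      rw [show (t + 1) * (t + 1 + 1) = t * (t + 1) + 2 * (t + 1) from by ring]
      rw [Nat.add_mul_div_left _ _ (by omega : 0 < 2)]
    rw [hnat]
    simp only [pvTri, List.range_succ, List.map_append, List.sum_append, List.map_cons,
      List.map_nil, List.sum_cons, List.sum_nil]
    rw [show pvTri t = ((List.range t).map (fun (d : Nat) => (d : Int) + 1)).sum from rfl] at ih
    rw [ih]
    push_cast
    ring

lemma pvTri_shift (l m : Nat) :
    ((List.range' l m).map (fun (y : Nat) => (y : Int) - (l : Int) + 1)).sum = pvTri m := by
  rw [List.range'_eq_map_range]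
  simp only [List.map_map]
  simp only [pvTri]
  congr 1
  apply List.map_congr_left
  intro d _
  simp only [Function.comp_apply]
  push_cast
  ring

lemma pvRun_sum (nums : List Int) (s m : Nat)
    (h : ∀ y, s ≤ y → y < s + m → pvStart nums y = s) :
    ((List.range' s m).map (pvTerm nums)).sum = pvTri m := by
  rw [← pvTri_shift s m]
  congr 1
  apply List.map_congr_left
  intro y hy
  rw [List.mem_range'_1] at hy
  simp only [pvTerm]
  rw [h y hy.1 hy.2]

lemma pvClose (nums : List Int) (i : Nat) (h0 : 0 < i) (hi : i ≤ nums.length) :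
    pvC nums (pvSN nums i) + pvTri (i - pvSN nums i) = pvC nums i := by
  obtain ⟨k, rfl⟩ : ∃ k, i = k + 1 := ⟨i - 1, by omega⟩
  simp only [pvSN]
  have hs := pvStart_le nums k
  rw [pvC_split nums (pvStart nums k) (k + 1) (by omega)]
  congr 1
  rw [pvRun_sum nums (pvStart nums k) (k + 1 - pvStart nums k)]
  intro y h1 h2
  have h2' : y ≤ k := by omega
  rw [pvStart_const nums (pvStart nums k) y h1
      (fun c hc1 hc2 => pvStart_noInv nums k c hc1 (by omega)),
    pvStart_idem]

lemma pvSN_eq (nums : List Int) (hn : 0 < nums.length) :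
    pvSN nums nums.length = pvStart nums (nums.length - 1) := by
  obtain ⟨m, hm⟩ : ∃ m, nums.length = m + 1 := ⟨nums.length - 1, by omega⟩
  rw [hm]
  simp [pvSN]

lemma pvSN_le (nums : List Int) : pvSN nums nums.length ≤ nums.length := by
  rcases (by omega : nums.length = 0 ∨ 0 < nums.length) with h | h
  · rw [h]; simp [pvSN]
  · rw [pvSN_eq nums h]
    have := pvStart_le nums (nums.length - 1)
    omega

lemma pvNextN_after (nums : List Int) (j : Nat) (hj1 : pvSN nums nums.length ≤ j)
    (hj2 : j < nums.length) : pvNextN nums j = nums.length := by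
  have hn : 0 < nums.length := by omega
  rw [pvSN_eq nums hn] at hj1
  simp only [pvNextN]
  rw [pvFIF_none_intro]
  intro c hc
  by_cases hcn : c < nums.length
  · exact pvStart_noInv nums (nums.length - 1) c (by omega) (by omega)
  · simp only [pvInv]
    rw [decide_eq_false (by omega : ¬ c < nums.length)]
    simp

-- ---- A's loop invariants ----

lemma pvStepInv (nums : List Int) (i : Nat) (hi : i < nums.length) (s : pvStA)
    (h : pvInvar nums i s) :
    pvInvar nums (i + 1) (pvStepA s (i : Int) (nums.getD i 0)) := by
  obtain ⟨h1, h2, h3, h4, h5, h6, h7⟩ := h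
  have hn : 0 < nums.length := by omega
  unfold pvStepA pvInvar
  cases i with
  | zero =>
    have h1' : s.prev = -1 := h1
    have h6' : s.pi = -1 := h6
    rw [h1', h2, h3, h4, h5, h6', h7]
    simp only [pvSN]
    have hzint : ((0 : Nat) : Int) = 0 := by norm_num
    have hF0 : ∀ v : Int, PySem.List.pyGetD
        ((List.range nums.length).map (fun j => if j < 0 then pvCntA nums j else v)) 0 0 = v := by
      intro v
      have := pvGetMapN nums.length (fun j => if j < 0 then pvCntA nums j else v) 0 0 hn
      rw [hzint] at this
      rw [this]
      simp
    have hC0 : pvC nums 0 = 0 := by simp [pvC]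
    have hS0 : pvStart nums 0 = 0 := rfl
    have hP0 : pvPrev nums 0 = -1 := rfl
    have hCnt0 : pvCnt nums 0 = 0 := by
      simp [pvCnt, pvInv]
    have hrange0 : PySem.List.pyRange ((0:Nat):Int) ((0:Nat):Int) 1 = [] := by
      have := pvRangeNat 0 0
      simpa using this
    have hfd : PySem.Int.floordiv ((((0:Nat):Int) - ((0:Nat):Int)) * ((((0:Nat):Int) - ((0:Nat):Int)) + 1)) 2 = 0 := by
      norm_num
    by_cases hph : nums.getD 0 0 < -1
    · rw [if_pos hph]
      have hphT : pvPhantom nums = true := by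
        simp only [pvPhantom]
        rw [decide_eq_true hn, decide_eq_true hph]
        rfl
      have hcA0 : pvCntA nums 0 = 1 := by
        simp [pvCntA, hphT, hCnt0]
      -- numInvs after the phantom increment
      have hgv : PySem.List.pyGetD
          ((List.range nums.length).map (fun j => if j < 0 then pvCntA nums j else 0))
          ((0:Nat):Int) 0 = 0 := by
        rw [pvGetMapN _ _ 0 0 hn]
        norm_num
      have hNI : PySem.List.pySetD
          ((List.range nums.length).map (fun j => if j < 0 then pvCntA nums j else 0))
          ((0:Nat):Int)
          (PySem.List.pyGetD
            ((List.range nums.length).map (fun j => if j < 0 then pvCntA nums j else 0))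
            ((0:Nat):Int) 0 + 1)
          = (List.range nums.length).map
              (fun j => if j = 0 then 0 + 1 else if j < 0 then pvCntA nums j else 0) := by
        rw [hgv, pvSetMapN _ _ 0 _ hn]
      rw [hNI, hrange0, hfd, hC0]
      rw [if_neg (by norm_num : ¬ ((0:Nat):Int) > 0)]
      simp only [List.foldl_nil, add_zero]
      have hat0 : PySem.List.pyGetD ((List.range nums.length).map
          (fun j => if j = 0 then 0 + 1 else if j < 0 then pvCntA nums j else 0)) ((0:Nat):Int) 0
          = 0 + 1 := by
        rw [pvGetMapN _ _ 0 0 hn, if_pos rfl]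
      have hatm1 : PySem.List.pyGetD ((List.range nums.length).map
          (fun j => if j = 0 then 0 + 1 else if j < 0 then pvCntA nums j else 0)) (((0:Nat):Int) - 1) 0
          = (if nums.length - 1 = 0 then 0 + 1 else 0) := by
        rw [show ((0:Nat):Int) - 1 = -1 from by norm_num, pvGetMapLast _ _ 0 hn]
        by_cases hone : nums.length - 1 = 0
        · rw [hone, if_pos rfl, if_pos rfl]
        · rw [if_neg hone, if_neg hone, if_neg (by omega)]
      rw [hat0, hatm1]
      have hpi : (if (0 + 1 : Int) ≠ (if nums.length - 1 = 0 then 0 + 1 else 0) then ((0:Nat):Int) - 1 else -1) = -1 := by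
        split_ifs <;> norm_num
      rw [hpi]
      refine ⟨by trivial, ?_, ?_, ?_, ?_, ?_, ?_⟩
      · simp [pvSN, hS0]
      · simp [pvSN, hS0, hC0]
      · apply List.map_congr_left
        intro j _
        by_cases hj : j = 0
        · subst hj
          simp [hcA0]
        · rw [if_neg hj, if_neg (by omega), if_neg (by omega)]
      · simp [pvSN, hS0]
      · simp [pvPrev, pvLIU]
      · rw [pvSetMapN _ _ 0 _ hn]
        apply List.map_congr_left
        intro j _
        by_cases hj : j = 0
        · subst hj
          rw [if_pos rfl, if_pos (by omega), hP0]
        · rw [if_neg hj, if_neg (by omega), if_neg (by omega)]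
    · rw [if_neg hph]
      rw [h2, h3, h4, h5, h6', h7]
      have hphF : pvPhantom nums = false := by
        simp only [pvPhantom]
        rw [decide_eq_false hph]
        simp
      have hcA0 : pvCntA nums 0 = 0 := by
        simp [pvCntA, hphF, hCnt0]
      rw [if_neg (by norm_num : ¬ ((0:Nat):Int) > 0)]
      have hat0 : PySem.List.pyGetD ((List.range nums.length).map
          (fun j => if j < 0 then pvCntA nums j else 0)) ((0:Nat):Int) 0 = 0 := by
        rw [pvGetMapN _ _ 0 0 hn]
        norm_num
      have hatm1 : PySem.List.pyGetD ((List.range nums.length).map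
          (fun j => if j < 0 then pvCntA nums j else 0)) (((0:Nat):Int) - 1) 0 = 0 := by
        rw [show ((0:Nat):Int) - 1 = -1 from by norm_num, pvGetMapLast _ _ 0 hn]
        rw [if_neg (by omega)]
      rw [hat0, hatm1]
      rw [if_neg (by norm_num)]
      refine ⟨by trivial, ?_, ?_, ?_, ?_, ?_, ?_⟩
      · simp [pvSN, hS0]
      · simp [pvSN, hS0, hC0]
      · apply List.map_congr_left
        intro j _
        by_cases hj : j = 0
        · subst hj
          simp [hcA0]
        · rw [if_neg (by omega), if_neg (by omega)]
      · simp [pvSN, hS0]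
      · simp [pvPrev, pvLIU]
      · rw [pvSetMapN _ _ 0 _ hn]
        apply List.map_congr_left
        intro j _
        by_cases hj : j = 0
        · subst hj
          rw [if_pos rfl, if_pos (by omega), hP0]
        · rw [if_neg hj, if_neg (by omega), if_neg (by omega)]
  | succ k =>
    have h1' : s.prev = nums.getD k 0 := h1
    have h6' : s.pi = pvPrev nums k := h6
    rw [h1', h2, h3, h4, h5, h6', h7]
    have hsk : pvStart nums k ≤ k := pvStart_le nums k
    have hSN : pvSN nums (k + 1) = pvStart nums k := rfl
    have hSN2 : pvSN nums (k + 1 + 1) = pvStart nums (k + 1) := rfl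
    have hki : ((k + 1 : Nat) : Int) - 1 = ((k : Nat) : Int) := by push_cast; ring
    have hgtk : ((k + 1 : Nat) : Int) > 0 := by push_cast; omega
    by_cases hcond : nums.getD (k + 1) 0 < nums.getD k 0
    · have hinv : pvInv nums (k + 1) = true := by
        simp only [pvInv]
        rw [decide_eq_true (by omega : 0 < k + 1), decide_eq_true hi,
          decide_eq_true (by simpa using hcond)]
        rfl
      have hstart1 : pvStart nums (k + 1) = k + 1 := by rw [pvStart, if_pos hinv]
      have hA : pvCntA nums (k + 1) = pvCntA nums k + 1 := by
        simp only [pvCntA, pvCnt_succ, hinv, if_pos]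
        push_cast
        ring
      rw [if_pos hcond]
      dsimp only
      have hg1 : PySem.List.pyGetD ((List.range nums.length).map
          (fun j => if j < k + 1 then pvCntA nums j else 0)) ((k + 1 : Nat) : Int) 0 = 0 := by
        rw [pvGetMapN _ _ (k + 1) 0 hi, if_neg (by omega)]
      have hNI1 : PySem.List.pySetD
          ((List.range nums.length).map (fun j => if j < k + 1 then pvCntA nums j else 0))
          ((k + 1 : Nat) : Int)
          (PySem.List.pyGetD ((List.range nums.length).map
            (fun j => if j < k + 1 then pvCntA nums j else 0)) ((k + 1 : Nat) : Int) 0 + 1)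
          = (List.range nums.length).map
              (fun j => if j = k + 1 then 0 + 1 else if j < k + 1 then pvCntA nums j else 0) := by
        rw [hg1, pvSetMapN _ _ (k + 1) _ hi]
      rw [hNI1]
      have htot : pvC nums (pvSN nums (k + 1)) + PySem.Int.floordiv
          ((((k + 1 : Nat) : Int) - ((pvSN nums (k + 1) : Nat) : Int)) *
            ((((k + 1 : Nat) : Int) - ((pvSN nums (k + 1) : Nat) : Int)) + 1)) 2
          = pvC nums (k + 1) := by
        rw [show ((k + 1 : Nat) : Int) - ((pvSN nums (k + 1) : Nat) : Int)
            = ((k + 1 - pvSN nums (k + 1) : Nat) : Int) from by rw [hSN]; omega]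
        rw [← pvTri_floordiv]
        exact pvClose nums (k + 1) (by omega) (by omega)
      simp only [htot]
      rw [pvFill nums.length _ (pvSN nums (k + 1)) (k + 1) (by omega) (pvC nums (k + 1))]
      rw [if_pos hgtk]
      have hg2 : PySem.List.pyGetD ((List.range nums.length).map
          (fun j => if j = k + 1 then 0 + 1 else if j < k + 1 then pvCntA nums j else 0))
          ((k + 1 : Nat) : Int) 0 = 0 + 1 := by
        rw [pvGetMapN _ _ (k + 1) 0 hi, if_pos rfl]
      have hg3 : PySem.List.pyGetD ((List.range nums.length).map
          (fun j => if j = k + 1 then 0 + 1 else if j < k + 1 then pvCntA nums j else 0))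
          (((k + 1 : Nat) : Int) - 1) 0 = pvCntA nums k := by
        rw [hki, pvGetMapN _ _ k 0 (by omega), if_neg (by omega), if_pos (by omega)]
      rw [hg2, hg3]
      have hNI2 : PySem.List.pySetD
          ((List.range nums.length).map
            (fun j => if j = k + 1 then 0 + 1 else if j < k + 1 then pvCntA nums j else 0))
          ((k + 1 : Nat) : Int) (0 + 1 + pvCntA nums k)
          = (List.range nums.length).map
              (fun j => if j = k + 1 then 0 + 1 + pvCntA nums k
                else if j = k + 1 then 0 + 1 else if j < k + 1 then pvCntA nums j else 0) := by
        rw [pvSetMapN _ _ (k + 1) _ hi]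
      rw [hNI2]
      have hg4 : PySem.List.pyGetD ((List.range nums.length).map
          (fun j => if j = k + 1 then 0 + 1 + pvCntA nums k
            else if j = k + 1 then 0 + 1 else if j < k + 1 then pvCntA nums j else 0))
          ((k + 1 : Nat) : Int) 0 = 0 + 1 + pvCntA nums k := by
        rw [pvGetMapN _ _ (k + 1) 0 hi, if_pos rfl]
      have hg5 : PySem.List.pyGetD ((List.range nums.length).map
          (fun j => if j = k + 1 then 0 + 1 + pvCntA nums k
            else if j = k + 1 then 0 + 1 else if j < k + 1 then pvCntA nums j else 0))
          (((k + 1 : Nat) : Int) - 1) 0 = pvCntA nums k := by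
        rw [hki, pvGetMapN _ _ k 0 (by omega), if_neg (by omega), if_neg (by omega),
          if_pos (by omega)]
      rw [hg4, hg5]
      rw [if_pos (show (0 : Int) + 1 + pvCntA nums k ≠ pvCntA nums k from by omega)]
      have hprev1 : pvPrev nums (k + 1) = ((k + 1 : Nat) : Int) - 1 := by
        simp only [pvPrev, pvLIU, hinv, if_pos]
      refine ⟨by trivial, ?_, ?_, ?_, ?_, ?_, ?_⟩
      · rw [hSN2, hstart1]
      · rw [hSN2, hstart1]
      · apply List.map_congr_left
        intro j _
        by_cases hj : j = k + 1
        · subst hj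
          rw [if_pos rfl, if_pos (by omega), hA]
          ring
        · rw [if_neg hj, if_neg hj]
          by_cases hj2 : j < k + 1
          · rw [if_pos hj2, if_pos (by omega)]
          · rw [if_neg hj2, if_neg (by omega)]
      · rw [hSN2, hstart1]
        apply List.map_congr_left
        intro j _
        rw [hSN]
        by_cases hj1 : pvStart nums k ≤ j ∧ j < k + 1
        · rw [if_pos hj1, if_pos (by omega)]
          congr 1
          simp only [pvNextN]
          rw [pvFIF_intro nums (j + 1) (k + 1) (by omega) hinv
            (fun c hc1 hc2 => pvStart_noInv nums k c (by omega) (by omega))]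
        · rw [if_neg hj1]
          by_cases hj2 : j < pvStart nums k
          · rw [if_pos hj2, if_pos (by omega)]
          · rw [if_neg hj2, if_neg (by omega)]
      · rw [hprev1]
      · rw [pvSetMapN _ _ (k + 1) _ hi]
        apply List.map_congr_left
        intro j _
        by_cases hj : j = k + 1
        · subst hj
          rw [if_pos rfl, if_pos (by omega), hprev1]
        · rw [if_neg hj]
          by_cases hj2 : j < k + 1
          · rw [if_pos hj2, if_pos (by omega)]
          · rw [if_neg hj2, if_neg (by omega)]
    · have hinv : pvInv nums (k + 1) = false := by
        simp only [pvInv]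
        rw [decide_eq_false (show ¬ (nums.getD (k + 1) 0 < nums.getD (k + 1 - 1) 0) from by
          rw [Nat.add_sub_cancel]; exact hcond)]
        simp
      have hstart1 : pvStart nums (k + 1) = pvStart nums k := by
        rw [pvStart, if_neg (by rw [hinv]; simp)]
      have hA : pvCntA nums (k + 1) = pvCntA nums k := by
        simp only [pvCntA, pvCnt_succ, hinv]
        norm_num
      have hprev1 : pvPrev nums (k + 1) = pvPrev nums k := by
        simp only [pvPrev, pvLIU, hinv]
        norm_num
      rw [if_neg hcond]
      dsimp only
      rw [h2, h3, h4, h5, h6', h7]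
      rw [if_pos hgtk]
      have hg1 : PySem.List.pyGetD ((List.range nums.length).map
          (fun j => if j < k + 1 then pvCntA nums j else 0)) ((k + 1 : Nat) : Int) 0 = 0 := by
        rw [pvGetMapN _ _ (k + 1) 0 hi, if_neg (by omega)]
      have hg2 : PySem.List.pyGetD ((List.range nums.length).map
          (fun j => if j < k + 1 then pvCntA nums j else 0)) (((k + 1 : Nat) : Int) - 1) 0
          = pvCntA nums k := by
        rw [hki, pvGetMapN _ _ k 0 (by omega), if_pos (by omega)]
      rw [hg1, hg2]
      have hNI2 : PySem.List.pySetD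
          ((List.range nums.length).map (fun j => if j < k + 1 then pvCntA nums j else 0))
          ((k + 1 : Nat) : Int) (0 + pvCntA nums k)
          = (List.range nums.length).map
              (fun j => if j = k + 1 then 0 + pvCntA nums k
                else if j < k + 1 then pvCntA nums j else 0) := by
        rw [pvSetMapN _ _ (k + 1) _ hi]
      rw [hNI2]
      have hg4 : PySem.List.pyGetD ((List.range nums.length).map
          (fun j => if j = k + 1 then 0 + pvCntA nums k
            else if j < k + 1 then pvCntA nums j else 0))
          ((k + 1 : Nat) : Int) 0 = 0 + pvCntA nums k := by
        rw [pvGetMapN _ _ (k + 1) 0 hi, if_pos rfl]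
      have hg5 : PySem.List.pyGetD ((List.range nums.length).map
          (fun j => if j = k + 1 then 0 + pvCntA nums k
            else if j < k + 1 then pvCntA nums j else 0))
          (((k + 1 : Nat) : Int) - 1) 0 = pvCntA nums k := by
        rw [hki, pvGetMapN _ _ k 0 (by omega), if_neg (by omega), if_pos (by omega)]
      rw [hg4, hg5]
      rw [if_neg (show ¬ ((0 : Int) + pvCntA nums k ≠ pvCntA nums k) from by omega)]
      refine ⟨by trivial, ?_, ?_, ?_, ?_, ?_, ?_⟩
      · rw [hSN2, hstart1, hSN]
      · rw [hSN2, hstart1, hSN]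
      · apply List.map_congr_left
        intro j _
        by_cases hj : j = k + 1
        · subst hj
          rw [if_pos rfl, if_pos (by omega), hA]
          ring
        · rw [if_neg hj]
          by_cases hj2 : j < k + 1
          · rw [if_pos hj2, if_pos (by omega)]
          · rw [if_neg hj2, if_neg (by omega)]
      · rw [hSN2, hstart1, hSN]
      · rw [hprev1]
      · rw [pvSetMapN _ _ (k + 1) _ hi]
        apply List.map_congr_left
        intro j _
        by_cases hj : j = k + 1
        · subst hj
          rw [if_pos rfl, if_pos (by omega), hprev1]
        · rw [if_neg hj]
          by_cases hj2 : j < k + 1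
          · rw [if_pos hj2, if_pos (by omega)]
          · rw [if_neg hj2, if_neg (by omega)]

lemma pvLoop1 (nums : List Int) : ∀ (k : Nat) (s : pvStA), k ≤ nums.length → pvInvar nums k s →
    pvInvar nums nums.length
      ((PySem.List.enumerate (nums.drop k) (k : Int)).foldl (fun s p => pvStepA s p.1 p.2) s) := by
  intro k s hk hinv
  induction hfu : nums.length - k generalizing k s with
  | zero =>
    have hkn : k = nums.length := by omega
    subst hkn
    rw [List.drop_length, PySem.List.enumerate_nil, List.foldl_nil]
    exact hinv
  | succ t ih =>
    have hk' : k < nums.length := by omega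
    rw [List.drop_eq_getElem_cons hk', PySem.List.enumerate_cons, List.foldl_cons]
    rw [show nums[k] = nums.getD k 0 from (List.getD_eq_getElem nums 0 hk').symm]
    rw [show (k : Int) + 1 = ((k + 1 : Nat) : Int) from by push_cast; ring]
    exact ih (k + 1) _ (by omega) (pvStepInv nums k hk' s hinv) (by omega)

lemma pvLoop2 (nums : List Int) :
    ((PySem.List.pyRange ((nums.length : Int) - 2) (-1) (-1)).foldl
      (fun (st : Int × List Int) i =>
        let nx := if PySem.List.pyGetD
            ((List.range nums.length).map (fun j => pvCntA nums j)) i 0 ≠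
            PySem.List.pyGetD ((List.range nums.length).map (fun j => pvCntA nums j)) (i + 1) 0
          then i + 1 else st.1
        (nx, PySem.List.pySetD st.2 i nx))
      (-1, (List.range nums.length).map (fun _ => (-1 : Int)))).2
    = (List.range nums.length).map (pvNext nums) := by
  have hnextrec : ∀ j : Nat, j + 1 < nums.length →
      pvNext nums j = if pvInv nums (j + 1) then ((j + 1 : Nat) : Int) else pvNext nums (j + 1) := by
    intro j hj
    rw [pvNext, pvFIF, dif_pos hj]
    by_cases hin : pvInv nums (j + 1)
    · rw [if_pos hin, if_pos hin]
    · rw [if_neg hin, if_neg hin, pvNext]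
  have hlast : pvNext nums (nums.length - 1) = -1 := by
    rw [pvNext, pvFIF_none_intro nums (nums.length - 1 + 1)]
    intro c hc
    simp only [pvInv]
    rw [decide_eq_false (by omega : ¬ c < nums.length)]
    simp
  have hrange : PySem.List.pyRange ((nums.length : Int) - 2) (-1) (-1)
      = (List.range (nums.length - 1)).map
          (fun (t : Nat) => (nums.length : Int) - 2 - t) := by
    simp only [PySem.List.pyRange]
    norm_num
    rcases (by omega : nums.length ≤ 1 ∨ 2 ≤ nums.length) with hnl | hnl
    · rw [if_neg (by push_cast; omega)]
      rw [show nums.length - 1 = 0 from by omega]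
      simp
    · rw [if_pos (by push_cast; omega)]
      rw [show ((nums.length : Int) - 2 + 1).toNat = nums.length - 1 from by omega]
      apply List.map_congr_left
      intro t _
      ring
  rw [hrange]
  have haux : ∀ (m : Nat), m ≤ nums.length - 1 →
      ((List.range m).map (fun (t : Nat) => (nums.length : Int) - 2 - t)).foldl
        (fun (st : Int × List Int) i =>
          let nx := if PySem.List.pyGetD
              ((List.range nums.length).map (fun j => pvCntA nums j)) i 0 ≠
              PySem.List.pyGetD ((List.range nums.length).map (fun j => pvCntA nums j)) (i + 1) 0
            then i + 1 else st.1
          (nx, PySem.List.pySetD st.2 i nx))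
        (-1, (List.range nums.length).map (fun _ => (-1 : Int)))
      = (pvNext nums (nums.length - 1 - m),
         (List.range nums.length).map
           (fun j => if nums.length - 1 - m ≤ j ∧ j ≤ nums.length - 2
             then pvNext nums j else -1)) := by
    intro m
    induction m with
    | zero =>
      intro _
      simp only [List.range_zero, List.map_nil, List.foldl_nil]
      rw [Nat.sub_zero, hlast]
      refine Prod.ext rfl ?_
      simp only
      apply List.map_congr_left
      intro j hj
      rw [List.mem_range] at hj
      by_cases hcj : nums.length - 1 ≤ j ∧ j ≤ nums.length - 2
      · rw [if_pos hcj, show j = nums.length - 1 from by omega, hlast]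
      · rw [if_neg hcj]
    | succ t ih =>
      intro hm
      rw [List.range_succ, List.map_append, List.foldl_append]
      rw [ih (by omega)]
      simp only [List.map_cons, List.map_nil, List.foldl_cons, List.foldl_nil]
      have hj : nums.length - 2 - t + 1 < nums.length := by omega
      have hjv : (nums.length : Int) - 2 - t = ((nums.length - 2 - t : Nat) : Int) := by omega
      set j := nums.length - 2 - t with hjdef
      have hj1 : ((j : Nat) : Int) + 1 = ((j + 1 : Nat) : Int) := by push_cast; ring
      rw [hjv, hj1]
      rw [pvGetMapN _ _ j 0 (by omega), pvGetMapN _ _ (j + 1) 0 (by omega)]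
      have hcnt : pvCntA nums (j + 1)
          = pvCntA nums j + (if pvInv nums (j + 1) then 1 else 0) := by
        simp only [pvCntA, pvCnt_succ]
        push_cast
        split_ifs <;> ring
      have hnxv : (if pvCntA nums j ≠ pvCntA nums (j + 1) then ((j + 1 : Nat) : Int)
          else pvNext nums (nums.length - 1 - t)) = pvNext nums j := by
        rw [show nums.length - 1 - t = j + 1 from by omega]
        rw [hnextrec j (by omega)]
        by_cases hin : pvInv nums (j + 1)
        · rw [if_pos hin, if_pos (by rw [hcnt, if_pos hin]; omega)]
        · rw [if_neg hin, if_neg (by rw [hcnt, if_neg hin]; omega)]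
      simp only [hnxv]
      refine Prod.ext ?_ ?_
      · simp only
        rw [show nums.length - 1 - (t + 1) = j from by omega]
      · simp only
        rw [pvSetMapN _ _ j _ (by omega)]
        apply List.map_congr_left
        intro c hc
        rw [List.mem_range] at hc
        by_cases hcj : c = j
        · subst hcj
          rw [if_pos rfl, if_pos (by omega)]
        · rw [if_neg hcj]
          by_cases hcin : nums.length - 1 - t ≤ c ∧ c ≤ nums.length - 2
          · rw [if_pos hcin, if_pos (by omega)]
          · rw [if_neg hcin, if_neg (by omega)]
  rw [haux (nums.length - 1) (le_refl _)]
  simp only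
  apply List.map_congr_left
  intro j hj
  rw [List.mem_range] at hj
  by_cases hjs : j ≤ nums.length - 2
  · rw [if_pos (by omega)]
  · rw [if_neg (by omega), show j = nums.length - 1 from by omega, hlast]

-- ---- per-query equalities ----

lemma pvQueryB (nums : List Int) (l r : Int) (h0 : 0 ≤ l) (h1 : l ≤ r)
    (h2 : r < (nums.length : Int)) :
    (PySem.List.pyRange l (r + 1) 1).foldl
      (fun acc y => acc + (y - max l
        (PySem.List.pyGetD ((List.range nums.length).map (fun j => (pvStart nums j : Int))) y 0)
        + 1)) 0
    = pvAns nums l.toNat r.toNat := by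
  obtain ⟨l', rfl⟩ : ∃ l' : Nat, l = (l' : Int) := ⟨l.toNat, by omega⟩
  obtain ⟨r', rfl⟩ : ∃ r' : Nat, r = (r' : Int) := ⟨r.toNat, by omega⟩
  have hr' : r' < nums.length := by exact_mod_cast h2
  rw [show ((r' : Int) + 1) = ((r' + 1 : Nat) : Int) from by push_cast; ring]
  rw [pvRangeNat, List.foldl_map, PySem.List.foldl_add]
  simp only [Int.toNat_natCast, pvAns, zero_add]
  congr 1
  apply List.map_congr_left
  intro y hy
  rw [List.mem_range'_1] at hy
  have hyn : y < nums.length := by omega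
  rw [pvGetMap nums.length _ (y : Int) 0 (by omega) (by exact_mod_cast hyn)]
  rw [Int.toNat_natCast]

lemma pvQueryA (nums : List Int) (l r : Int) (h0 : 0 ≤ l) (h1 : l ≤ r)
    (h2 : r < (nums.length : Int)) :
    (if PySem.List.pyGetD ((List.range nums.length).map (fun j => pvCntA nums j)) l 0 =
        PySem.List.pyGetD ((List.range nums.length).map (fun j => pvCntA nums j)) r 0 then
      PySem.Int.floordiv ((r - l + 1) * ((r - l + 1) + 1)) 2
    else
      max 0
        (PySem.List.pyGetD ((List.range nums.length).map (fun j => pvC nums (pvNextN nums j)))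
          (PySem.List.pyGetD ((List.range nums.length).map (pvPrev nums)) r 0) 0 -
         PySem.List.pyGetD ((List.range nums.length).map (fun j => pvC nums (pvNextN nums j))) l 0)
      + PySem.Int.floordiv
          ((PySem.List.pyGetD ((List.range nums.length).map (pvNext nums)) l 0 - l) *
           ((PySem.List.pyGetD ((List.range nums.length).map (pvNext nums)) l 0 - l) + 1)) 2
      + PySem.Int.floordiv
          ((r - PySem.List.pyGetD ((List.range nums.length).map (pvPrev nums)) r 0) *
           ((r - PySem.List.pyGetD ((List.range nums.length).map (pvPrev nums)) r 0) + 1)) 2)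
    = pvAns nums l.toNat r.toNat := by
  obtain ⟨l', rfl⟩ : ∃ l' : Nat, l = (l' : Int) := ⟨l.toNat, by omega⟩
  obtain ⟨r', rfl⟩ : ∃ r' : Nat, r = (r' : Int) := ⟨r.toNat, by omega⟩
  have hlr : l' ≤ r' := by exact_mod_cast h1
  have hrn : r' < nums.length := by exact_mod_cast h2
  have hln : l' < nums.length := by omega
  rw [pvGetMap _ _ (l' : Int) 0 (by omega) (by exact_mod_cast hln),
      pvGetMap _ _ (r' : Int) 0 (by omega) (by exact_mod_cast hrn)]
  simp only [Int.toNat_natCast]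
  by_cases hc : pvCntA nums l' = pvCntA nums r'
  · rw [if_pos hc]
    have hno := (pvCntA_eq_iff nums l' r' hlr).mp hc
    have hans : pvAns nums l' r' = pvTri (r' + 1 - l') := by
      simp only [pvAns]
      rw [← pvTri_shift l' (r' + 1 - l')]
      congr 1
      apply List.map_congr_left
      intro y hy
      rw [List.mem_range'_1] at hy
      have hsy : pvStart nums y ≤ l' := by
        rw [pvStart_const nums l' y hy.1 (fun k hk1 hk2 => hno k hk1 (by omega))]
        exact pvStart_le nums l'
      rw [max_eq_left (by exact_mod_cast hsy)]
    rw [hans, pvTri_floordiv, show ((r' + 1 - l' : Nat) : Int) = (r' : Int) - l' + 1 from by omega]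
  · rw [if_neg hc]
    have hex : ∃ k, l' < k ∧ k ≤ r' ∧ pvInv nums k = true := by
      by_contra hno
      push_neg at hno
      exact hc ((pvCntA_eq_iff nums l' r' hlr).mpr
        (fun k hk1 hk2 => by
          rcases Bool.eq_false_or_eq_true (pvInv nums k) with h | h
          · exact absurd h (hno k hk1 hk2)
          · exact h))
    obtain ⟨k, hk1, hk2, hk3⟩ := hex
    rcases hf : pvFIF nums (l' + 1) with _ | f
    · exact absurd hk3 (by rw [pvFIF_none nums _ hf k (by omega)]; simp)
    obtain ⟨hf1, hf2, hf3, hf4⟩ := pvFIF_spec nums _ f hf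
    have hfk : f ≤ k := by
      by_contra hc2
      exact absurd hk3 (by rw [hf4 k (by omega) (by omega)]; simp)
    rcases hp : pvLIU nums r' with _ | p
    · exact absurd hk3 (by rw [pvLIU_none nums r' hp k (by omega)]; simp)
    obtain ⟨hp1, hp2, hp3⟩ := pvLIU_spec nums r' p hp
    have hkp : k ≤ p := by
      by_contra hc2
      exact absurd hk3 (by rw [hp3 k (by omega) (by omega)]; simp)
    have hp0 : 0 < p := by
      by_contra h0
      rw [show p = 0 from by omega] at hp2
      simp [pvInv] at hp2
    -- evaluate the table lookups
    rw [pvGetMap _ (pvNext nums) (l' : Int) 0 (by omega) (by exact_mod_cast hln),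
        pvGetMap _ (pvPrev nums) (r' : Int) 0 (by omega) (by exact_mod_cast hrn)]
    simp only [Int.toNat_natCast, pvNext, pvPrev, hf, hp]
    rw [show (p : Int) - 1 = ((p - 1 : Nat) : Int) from by omega]
    rw [pvGetMap _ _ ((p - 1 : Nat) : Int) 0 (by omega)
        (by exact_mod_cast (by omega : p - 1 < nums.length)),
      pvGetMap _ _ (l' : Int) 0 (by omega) (by exact_mod_cast hln)]
    simp only [Int.toNat_natCast]
    have hnp : pvNextN nums (p - 1) = p := by
      simp only [pvNextN]
      rw [show p - 1 + 1 = p from by omega,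
        pvFIF_intro nums p p (le_refl _) hp2 (fun c hc1 hc2 => by omega)]
    have hnl : pvNextN nums l' = f := by simp only [pvNextN, hf]
    rw [hnp, hnl]
    rw [max_eq_right (sub_nonneg.mpr (pvC_mono nums f p (by omega)))]
    rw [show (f : Int) - l' = ((f - l' : Nat) : Int) from by omega,
      show (r' : Int) - ((p - 1 : Nat) : Int) = ((r' + 1 - p : Nat) : Int) from by omega,
      ← pvTri_floordiv, ← pvTri_floordiv]
    -- split the direct sum into the three regions
    have hr1 : List.range' l' (r' + 1 - l')
        = (List.range' l' (f - l') ++ List.range' f (p - f)) ++ List.range' p (r' + 1 - p) := by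
      have e1 : List.range' l' (f - l') ++ List.range' f (p - f) = List.range' l' (p - l') := by
        have := List.range'_append (s := l') (m := f - l') (n := p - f) (step := 1)
        simp only [one_mul] at this
        rw [show l' + (f - l') = f from by omega] at this
        rw [this, show f - l' + (p - f) = p - l' from by omega]
      rw [e1]
      have := List.range'_append (s := l') (m := p - l') (n := r' + 1 - p) (step := 1)
      simp only [one_mul] at this
      rw [show l' + (p - l') = p from by omega] at this
      rw [this, show p - l' + (r' + 1 - p) = r' + 1 - l' from by omega]
    simp only [pvAns, hr1, List.map_append, List.sum_append]
    have hS1 : ((List.range' l' (f - l')).map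
        (fun (y : Nat) => (y : Int) - max (l' : Int) ((pvStart nums y : Nat) : Int) + 1)).sum
        = pvTri (f - l') := by
      rw [← pvTri_shift l' (f - l')]
      congr 1
      apply List.map_congr_left
      intro y hy
      rw [List.mem_range'_1] at hy
      have hsy : pvStart nums y ≤ l' := by
        rw [pvStart_const nums l' y hy.1 (fun c hc1 hc2 => hf4 c (by omega) (by omega))]
        exact pvStart_le nums l'
      rw [max_eq_left (by exact_mod_cast hsy)]
    have hS2 : ((List.range' f (p - f)).map
        (fun (y : Nat) => (y : Int) - max (l' : Int) ((pvStart nums y : Nat) : Int) + 1)).sum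
        = pvC nums p - pvC nums f := by
      rw [pvC_split nums f p (by omega)]
      have : ((List.range' f (p - f)).map
          (fun (y : Nat) => (y : Int) - max (l' : Int) ((pvStart nums y : Nat) : Int) + 1)).sum
          = ((List.range' f (p - f)).map (pvTerm nums)).sum := by
        congr 1
        apply List.map_congr_left
        intro y hy
        rw [List.mem_range'_1] at hy
        have hsy : f ≤ pvStart nums y := pvStart_inv_le nums y f hf3 (by omega)
        rw [max_eq_right (by exact_mod_cast (by omega : l' ≤ pvStart nums y))]
        simp [pvTerm]
      rw [this]
      ring
    have hS3 : ((List.range' p (r' + 1 - p)).map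
        (fun (y : Nat) => (y : Int) - max (l' : Int) ((pvStart nums y : Nat) : Int) + 1)).sum
        = pvTri (r' + 1 - p) := by
      rw [← pvTri_shift p (r' + 1 - p)]
      congr 1
      apply List.map_congr_left
      intro y hy
      rw [List.mem_range'_1] at hy
      have hsy : pvStart nums y = p := by
        rw [pvStart_const nums p y (by omega) (fun c hc1 hc2 => hp3 c (by omega) (by omega))]
        exact pvStart_self nums p hp2
      rw [hsy, max_eq_right (by exact_mod_cast (by omega : l' ≤ p))]
    rw [hS1, hS2, hS3]
    ring

-- ---- assembling the two ports ----

lemma pvBstartList (nums : List Int) :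
    (PySem.List.pyRange 1 (nums.length : Int) 1).foldl
      (fun st i =>
        PySem.List.pySetD st i
          (if PySem.List.pyGetD nums i 0 < PySem.List.pyGetD nums (i - 1) 0 then i
           else PySem.List.pyGetD st (i - 1) 0))
      (PySem.List.pyRepeat [0] (nums.length : Int))
    = (List.range nums.length).map (fun j => (pvStart nums j : Int)) := by
  have hinit : PySem.List.pyRepeat [(0 : Int)] (nums.length : Int)
      = (List.range nums.length).map
          (fun j => if j < 1 then ((pvStart nums j : Nat) : Int) else 0) := by
    rw [PySem.List.pyRepeat_singleton, Int.toNat_natCast]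
    apply List.ext_getElem
    · simp
    · intro k h1 h2
      have hk : k < nums.length := by simpa using h1
      simp only [List.getElem_replicate, List.getElem_map, List.getElem_range]
      by_cases hk1 : k < 1
      · rw [if_pos hk1, show k = 0 from by omega]
        simp [pvStart]
      · rw [if_neg hk1]
  have haux : ∀ (m a : Nat), 1 ≤ a → a + m ≤ nums.length →
      ((List.range' a m).map (fun (j : Nat) => (j : Int))).foldl
        (fun st i =>
          PySem.List.pySetD st i
            (if PySem.List.pyGetD nums i 0 < PySem.List.pyGetD nums (i - 1) 0 then i
             else PySem.List.pyGetD st (i - 1) 0))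
        ((List.range nums.length).map
          (fun j => if j < a then ((pvStart nums j : Nat) : Int) else 0))
      = (List.range nums.length).map
          (fun j => if j < a + m then ((pvStart nums j : Nat) : Int) else 0) := by
    intro m
    induction m with
    | zero => intro a _ _; simp
    | succ t ih =>
      intro a ha ham
      have han : a < nums.length := by omega
      rw [show List.range' a (t + 1) = a :: List.range' (a + 1) t from rfl]
      simp only [List.map_cons, List.foldl_cons]
      have e1 : ((a : Int) - 1) = ((a - 1 : Nat) : Int) := by omega
      have e2 : PySem.List.pyGetD ((List.range nums.length).map
            (fun j => if j < a then ((pvStart nums j : Nat) : Int) else 0)) ((a : Int) - 1) 0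
          = ((pvStart nums (a - 1) : Nat) : Int) := by
        rw [e1, pvGetMap _ _ _ _ (by omega) (by exact_mod_cast (by omega : a - 1 < nums.length))]
        rw [Int.toNat_natCast, if_pos (by omega)]
      have e3 : (if PySem.List.pyGetD nums (a : Int) 0 < PySem.List.pyGetD nums ((a : Int) - 1) 0
            then (a : Int) else ((pvStart nums (a - 1) : Nat) : Int))
          = ((pvStart nums a : Nat) : Int) := by
        rw [e1]
        simp only [PySem.List.pyGetD_natCast]
        obtain ⟨k, rfl⟩ : ∃ k, a = k + 1 := ⟨a - 1, by omega⟩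
        by_cases hc : nums.getD (k + 1) 0 < nums.getD (k + 1 - 1) 0
        · rw [if_pos hc]
          have hinv : pvInv nums (k + 1) = true := by
            simp only [pvInv]
            rw [decide_eq_true (by omega : (0:Nat) < k + 1), decide_eq_true han,
              decide_eq_true hc]
            rfl
          rw [pvStart, if_pos hinv]
        · rw [if_neg hc]
          have hinv : pvInv nums (k + 1) = false := by
            simp only [pvInv]
            rw [decide_eq_false hc]
            simp
          rw [pvStart, if_neg (by rw [hinv]; simp)]
          simp
      rw [e2, e3, PySem.List.pySetD_natCast,
        pvSetMap _ _ a _ han]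
      have e4 : (List.range nums.length).map
            (fun j => if j = a then ((pvStart nums a : Nat) : Int)
              else if j < a then ((pvStart nums j : Nat) : Int) else 0)
          = (List.range nums.length).map
            (fun j => if j < a + 1 then ((pvStart nums j : Nat) : Int) else 0) := by
        apply List.map_congr_left
        intro j _
        by_cases hj : j = a
        · subst hj; rw [if_pos rfl, if_pos (by omega)]
        · rw [if_neg hj]
          by_cases hj2 : j < a
          · rw [if_pos hj2, if_pos (by omega)]
          · rw [if_neg hj2, if_neg (by omega)]
      rw [e4]
      have := ih (a + 1) (by omega) (by omega)
      rw [show a + 1 + t = a + (t + 1) from by omega] at this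
      exact this
  have hrange : PySem.List.pyRange 1 (nums.length : Int) 1
      = (List.range' 1 (nums.length - 1)).map (fun (j : Nat) => (j : Int)) := by
    have := pvRangeNat 1 nums.length
    simpa using this
  rw [hrange, hinit]
  rcases (by omega : nums.length = 0 ∨ 1 ≤ nums.length) with hn | hn
  · rw [hn]
    simp
  · have := haux (nums.length - 1) 1 (le_refl _) (by omega)
    rw [show 1 + (nums.length - 1) = nums.length from by omega] at this
    rw [this]
    apply List.map_congr_left
    intro j hj
    rw [List.mem_range] at hj
    rw [if_pos hj]

lemma pvA_eq (nums : List Int) (queries : List (List Int))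
    (hpre : Pre_countStableSubarrays nums queries) :
    countStableSubarrays nums queries
      = queries.map (fun q => pvAns nums (q.getD 0 0).toNat (q.getD 1 0).toNat) := by
  unfold countStableSubarrays
  simp only [PySem.List.len_eq]
  have hmap : ∀ v : Int, (PySem.List.pyRange 0 (nums.length : Int) 1).map (fun _ => v)
      = (List.range nums.length).map (fun _ => v) := by
    intro v
    rw [PySem.List.pyRange_zero_natCast, List.map_map]
    rfl
  have hinv0 : pvInvar nums 0
      { prev := -1, total := 0, left := 0,
        pre := (PySem.List.pyRange 0 (nums.length : Int) 1).map (fun _ => 0),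
        numInvs := (PySem.List.pyRange 0 (nums.length : Int) 1).map (fun _ => 0),
        prevInv := (PySem.List.pyRange 0 (nums.length : Int) 1).map (fun _ => (-1 : Int)),
        pi := -1 } := by
    refine ⟨rfl, by simp [pvSN], by simp [pvSN, pvC], ?_, ?_, rfl, ?_⟩
    · simp only [hmap]
      apply List.map_congr_left
      intro j _
      rw [if_neg (by omega)]
    · simp only [hmap]
      apply List.map_congr_left
      intro j _
      rw [if_neg (by simp [pvSN])]
    · simp only [hmap]
      apply List.map_congr_left
      intro j _
      rw [if_neg (by omega)]
  have hloop := pvLoop1 nums 0 _ (by omega) hinv0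
  simp only [List.drop_zero, Nat.cast_zero] at hloop
  obtain ⟨g1, g2, g3, g4, g5, g6, g7⟩ := hloop
  simp only [g2, g3, g4, g5, g7]
  -- numInvs / prevInv as plain maps
  have g4' : (List.range nums.length).map
        (fun j => if j < nums.length then pvCntA nums j else 0)
      = (List.range nums.length).map (fun j => pvCntA nums j) := by
    apply List.map_congr_left
    intro j hj
    rw [List.mem_range] at hj
    rw [if_pos hj]
  have g7' : (List.range nums.length).map
        (fun j => if j < nums.length then pvPrev nums j else -1)
      = (List.range nums.length).map (pvPrev nums) := by
    apply List.map_congr_left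
    intro j hj
    rw [List.mem_range] at hj
    rw [if_pos hj]
  simp only [g4', g7']
  -- close the last run: total becomes pvC n
  have hsle := pvSN_le nums
  simp only [show (nums.length : Int) - ((pvSN nums nums.length : Nat) : Int)
      = ((nums.length - pvSN nums nums.length : Nat) : Int) from by omega]
  have htot : pvC nums (pvSN nums nums.length) + PySem.Int.floordiv
      (((nums.length - pvSN nums nums.length : Nat) : Int) *
        (((nums.length - pvSN nums nums.length : Nat) : Int) + 1)) 2
      = pvC nums nums.length := by
    rw [← pvTri_floordiv]
    rcases (by omega : nums.length = 0 ∨ 0 < nums.length) with h | h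
    · rw [h]
      simp [pvSN, pvTri, pvC]
    · exact pvClose nums nums.length h (le_refl _)
  simp only [htot]
  -- final prefix array
  simp only [pvFill nums.length
    (fun j => if j < pvSN nums nums.length then pvC nums (pvNextN nums j) else 0)
    (pvSN nums nums.length) nums.length (le_refl _) (pvC nums nums.length)]
  have hpre' : (List.range nums.length).map
        (fun j => if pvSN nums nums.length ≤ j ∧ j < nums.length then pvC nums nums.length
          else if j < pvSN nums nums.length then pvC nums (pvNextN nums j) else 0)
      = (List.range nums.length).map (fun j => pvC nums (pvNextN nums j)) := by
    apply List.map_congr_left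
    intro j hj
    rw [List.mem_range] at hj
    by_cases h1 : j < pvSN nums nums.length
    · rw [if_neg (by omega), if_pos h1]
    · rw [if_pos ⟨by omega, hj⟩, pvNextN_after nums j (by omega) hj]
  simp only [hpre']
  -- next_inv array
  simp only [hmap (-1), pvLoop2 nums]
  -- the query loop
  have hE := pvEnumSet
    (fun q =>
      if PySem.List.pyGetD ((List.range nums.length).map (fun j => pvCntA nums j))
          (PySem.List.pyGetD q 0 0) 0 =
        PySem.List.pyGetD ((List.range nums.length).map (fun j => pvCntA nums j))
          (PySem.List.pyGetD q 1 0) 0 then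
        PySem.Int.floordiv ((PySem.List.pyGetD q 1 0 - PySem.List.pyGetD q 0 0 + 1) *
          ((PySem.List.pyGetD q 1 0 - PySem.List.pyGetD q 0 0 + 1) + 1)) 2
      else
        max 0
          (PySem.List.pyGetD ((List.range nums.length).map (fun j => pvC nums (pvNextN nums j)))
            (PySem.List.pyGetD ((List.range nums.length).map (pvPrev nums))
              (PySem.List.pyGetD q 1 0) 0) 0 -
           PySem.List.pyGetD ((List.range nums.length).map (fun j => pvC nums (pvNextN nums j)))
            (PySem.List.pyGetD q 0 0) 0)
        + PySem.Int.floordiv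
            ((PySem.List.pyGetD ((List.range nums.length).map (pvNext nums))
                (PySem.List.pyGetD q 0 0) 0 - PySem.List.pyGetD q 0 0) *
             ((PySem.List.pyGetD ((List.range nums.length).map (pvNext nums))
                (PySem.List.pyGetD q 0 0) 0 - PySem.List.pyGetD q 0 0) + 1)) 2
        + PySem.Int.floordiv
            ((PySem.List.pyGetD q 1 0 -
                PySem.List.pyGetD ((List.range nums.length).map (pvPrev nums))
                  (PySem.List.pyGetD q 1 0) 0) *
             ((PySem.List.pyGetD q 1 0 -
                PySem.List.pyGetD ((List.range nums.length).map (pvPrev nums))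
                  (PySem.List.pyGetD q 1 0) 0) + 1)) 2)
    queries
    ((PySem.List.pyRange 0 (queries.length : Int) 1).map (fun _ => 0)) 0
    (by rw [PySem.List.pyRange_zero_natCast]; simp)
  simp only [Nat.cast_zero] at hE
  rw [hE]
  simp only [List.take_zero, List.nil_append]
  apply List.map_congr_left
  intro q hq
  obtain ⟨hq2, hq0, hq01, hq1⟩ := hpre q hq
  rw [show (0 : Int) = ((0 : Nat) : Int) from rfl, show (1 : Int) = ((1 : Nat) : Int) from rfl,
    PySem.List.pyGetD_natCast, PySem.List.pyGetD_natCast]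
  exact pvQueryA nums (q.getD 0 0) (q.getD 1 0) hq0 hq01 hq1

lemma pvB_eq (nums : List Int) (queries : List (List Int))
    (hpre : Pre_countStableSubarrays nums queries) :
    countStableSubarrays_alt nums queries
      = queries.map (fun q => pvAns nums (q.getD 0 0).toNat (q.getD 1 0).toNat) := by
  simp only [countStableSubarrays_alt, PySem.List.len_eq]
  rw [pvBstartList]
  apply List.map_congr_left
  intro q hq
  obtain ⟨hq2, hq0, hq01, hq1⟩ := hpre q hq
  rw [show (0 : Int) = ((0 : Nat) : Int) from rfl, show (1 : Int) = ((1 : Nat) : Int) from rfl,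
    PySem.List.pyGetD_natCast, PySem.List.pyGetD_natCast]
  exact pvQueryB nums (q.getD 0 0) (q.getD 1 0) hq0 hq01 hq1

-- ===== VERDICT (by name: the statement is the Claim_ definition above) =====
theorem countStableSubarrays_spec : Claim_equal_countStableSubarrays := by
  intro nums queries _hdom hpre
  unfold Spec_countStableSubarrays
  rw [pvA_eq nums queries hpre, pvB_eq nums queries hpre]
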